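-- pv_equiv track=rewrite | github.com/Jeanvr/supplier-scrapi | src/core/catalog_fallback_trimmer.py | _genebre_context_root
-- ===== SOURCE A (Python) =====
-- GENEBRE_CONTEXT_STOPWORDS = {
--     "ARTICLE",
--     "ARTICULO",
--     "BOX",
--     "CAJA",
--     "CARTON",
--     "CODIGO",
--     "CODE",
--     "GE",
--     "GENEBRE",
--     "GENEBRESA",
--     "INFORMACION",
--     "INFORMATION",
--     "MEDIDA",
--     "NEW",
--     "PAGINA",
--     "PAGE",
--     "PESO",
--     "PRICE",
--     "REF",
--     "SERIE",
--     "SIZE",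
--     "TECHNICAL",
--     "TECNICA",
--     "WEIGHT",
-- }
--
-- def _genebre_context_root(token: str) -> str:
--     if not token or token in GENEBRE_CONTEXT_STOPWORDS:
--         return ""
--     if token.startswith("DN") and any(ch.isdigit() for ch in token[2:]):
--         return "DN"
--     if token.startswith("VALVUL") or token == "VALVE":
--         return "VALVULA"
--     if token.startswith("ESFER") or token.startswith("BOLA") or token == "BALL":
--         return "BOLA"
--     if token.startswith("FILTR") or token == "FILTER":
--         return "FILTRO"
--     if token.startswith("RETENC") or token == "CHECK":
--         return "RETENCION"
--     if token.startswith("BRID") or token == "FLANGED":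
--         return "BRIDAS"
--     if token.startswith("FUNDIC") or token == "CAST":
--         return "FUNDICION"
--     if token.startswith("PAPALLON") or token.startswith("MARIP") or token.startswith("BUTTERFL"):
--         return "PAPALLONA"
--     if token.startswith("ROSC") or token.startswith("THREAD"):
--         return "ROSCA"
--     if token.startswith("VIA") or token.startswith("VIE"):
--         return "VIAS"
--     if token.startswith("CLAPET"):
--         return "CLAPETA"
--     if token.startswith("PRESS") or token.startswith("PRESI"):
--         return "PRESION"
--     if token.startswith("REDUCT"):
--         return "REDUCTORA"
--     if token.startswith("COMPORT"):
--         return "COMPORTA"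
--     if token.startswith("MANIG") or token.startswith("MANGUIT") or token.startswith("COMPENS"):
--         return "MANIGUET"
--     if token.startswith("ELAST"):
--         return "ELASTICO"
--     if token.startswith("LATON") or token.startswith("LLAUT") or token == "BRASS":
--         return "LATON"
--     if token.startswith("INOX") or token == "STAINLESS":
--         return "INOX"
--     if token.startswith("RINOX"):
--         return "RINOX"
--     if token in {"DOBLE", "SIMPLE", "ONDA", "WAFER", "LUG", "DISC", "GOMA", "MINI"}:
--         return token
--     if len(token) >= 6:
--         return token[:5]
--     if len(token) >= 4:
--         return token
--     return ""
-- ===== SOURCE B (Python) =====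
-- GENEBRE_CONTEXT_STOPWORDS = {
--     "ARTICLE", "ARTICULO", "BOX", "CAJA", "CARTON", "CODIGO", "CODE", "GE",
--     "GENEBRE", "GENEBRESA", "INFORMACION", "INFORMATION", "MEDIDA", "NEW",
--     "PAGINA", "PAGE", "PESO", "PRICE", "REF", "SERIE", "SIZE", "TECHNICAL",
--     "TECNICA", "WEIGHT",
-- }
--
-- # Exact-word table (whole token -> root); the identity words map to themselves.
-- _EXACT_ROOTS = {
--     "VALVE": "VALVULA", "BALL": "BOLA", "FILTER": "FILTRO", "CHECK": "RETENCION",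
--     "FLANGED": "BRIDAS", "CAST": "FUNDICION", "BRASS": "LATON", "STAINLESS": "INOX",
--     "DOBLE": "DOBLE", "SIMPLE": "SIMPLE", "ONDA": "ONDA", "WAFER": "WAFER",
--     "LUG": "LUG", "DISC": "DISC", "GOMA": "GOMA", "MINI": "MINI",
-- }
--
-- # Prefix table (token[:len(prefix)] -> root).  The prefixes are PREFIX-FREE
-- # (none is a prefix of another) and no exact word extends any of them, so a
-- # token matches at most one pattern and hashed slice lookup is equivalent to
-- # the original ordered startswith cascade.
-- _PREFIX_ROOTS = {
--     "VALVUL": "VALVULA", "ESFER": "BOLA", "BOLA": "BOLA", "FILTR": "FILTRO",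
--     "RETENC": "RETENCION", "BRID": "BRIDAS", "FUNDIC": "FUNDICION",
--     "PAPALLON": "PAPALLONA", "MARIP": "PAPALLONA", "BUTTERFL": "PAPALLONA",
--     "ROSC": "ROSCA", "THREAD": "ROSCA", "VIA": "VIAS", "VIE": "VIAS",
--     "CLAPET": "CLAPETA", "PRESS": "PRESION", "PRESI": "PRESION",
--     "REDUCT": "REDUCTORA", "COMPORT": "COMPORTA", "MANIG": "MANIGUET",
--     "MANGUIT": "MANIGUET", "COMPENS": "MANIGUET", "ELAST": "ELASTICO",
--     "LATON": "LATON", "LLAUT": "LATON", "INOX": "INOX", "RINOX": "RINOX",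
-- }
--
--
-- def _root_lookup(token: str) -> str:
--     root = _EXACT_ROOTS.get(token)
--     if root is not None:
--         return root
--     for k in range(8, 2, -1):          # prefix lengths present in the table
--         root = _PREFIX_ROOTS.get(token[:k])
--         if root is not None:
--             return root
--     if len(token) >= 6:
--         return token[:5]
--     if len(token) >= 4:
--         return token
--     return ""
--
--
-- def _genebre_context_root(token: str) -> str:
--     if not token or token in GENEBRE_CONTEXT_STOPWORDS:
--         return ""
--     if token.startswith("DN") and any(ch.isdigit() for ch in token[2:]):
--         return "DN"
--     return _root_lookup(token)
-- ===== Notes on version B (the rewrite author's own statement) =====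
-- stated objective: alternative
-- what changed: The ordered startswith cascade is replaced by hashed dictionary dispatch: one exact-word dict lookup plus at most six dict lookups of the fixed-length slices token[:8..3] against a prefix dict; this is equivalent because the pattern set is prefix-free and disjoint, so a token matches at most one rule and rule order never matters.
import Mathlib
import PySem

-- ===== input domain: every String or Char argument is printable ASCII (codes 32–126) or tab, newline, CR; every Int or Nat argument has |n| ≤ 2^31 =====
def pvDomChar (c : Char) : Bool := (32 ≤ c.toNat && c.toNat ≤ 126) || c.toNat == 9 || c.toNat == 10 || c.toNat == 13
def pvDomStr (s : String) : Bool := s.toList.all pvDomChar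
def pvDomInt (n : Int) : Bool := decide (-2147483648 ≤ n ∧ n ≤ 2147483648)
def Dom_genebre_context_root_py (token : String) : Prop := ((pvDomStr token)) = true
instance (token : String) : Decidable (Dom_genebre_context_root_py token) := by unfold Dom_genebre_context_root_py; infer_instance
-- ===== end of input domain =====

-- B replaces A's ordered startswith cascade by hashed dict dispatch: one exact-word dict
-- lookup plus dict lookups of the fixed-length slices token[:8..3] against a prefix dict
-- (correct because the pattern set is prefix-free and disjoint); objective: alternative.

-- ===== PORT A =====
def pvStopwords : List String :=
  ["ARTICLE", "ARTICULO", "BOX", "CAJA", "CARTON", "CODIGO", "CODE", "GE",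
   "GENEBRE", "GENEBRESA", "INFORMACION", "INFORMATION", "MEDIDA", "NEW",
   "PAGINA", "PAGE", "PESO", "PRICE", "REF", "SERIE", "SIZE", "TECHNICAL",
   "TECNICA", "WEIGHT"]

def genebre_context_root_py (token : String) : String :=
  if token = "" ∨ token ∈ pvStopwords then ""
  else if PySem.Str.startswith token "DN" = true ∧
          (PySem.List.slice token.toList (some 2) none).any PySem.Chars.isdigit = true then "DN"
  else if PySem.Str.startswith token "VALVUL" = true ∨ token = "VALVE" then "VALVULA"
  else if PySem.Str.startswith token "ESFER" = true ∨ PySem.Str.startswith token "BOLA" = true ∨ token = "BALL" then "BOLA"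
  else if PySem.Str.startswith token "FILTR" = true ∨ token = "FILTER" then "FILTRO"
  else if PySem.Str.startswith token "RETENC" = true ∨ token = "CHECK" then "RETENCION"
  else if PySem.Str.startswith token "BRID" = true ∨ token = "FLANGED" then "BRIDAS"
  else if PySem.Str.startswith token "FUNDIC" = true ∨ token = "CAST" then "FUNDICION"
  else if PySem.Str.startswith token "PAPALLON" = true ∨ PySem.Str.startswith token "MARIP" = true ∨ PySem.Str.startswith token "BUTTERFL" = true then "PAPALLONA"
  else if PySem.Str.startswith token "ROSC" = true ∨ PySem.Str.startswith token "THREAD" = true then "ROSCA"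
  else if PySem.Str.startswith token "VIA" = true ∨ PySem.Str.startswith token "VIE" = true then "VIAS"
  else if PySem.Str.startswith token "CLAPET" = true then "CLAPETA"
  else if PySem.Str.startswith token "PRESS" = true ∨ PySem.Str.startswith token "PRESI" = true then "PRESION"
  else if PySem.Str.startswith token "REDUCT" = true then "REDUCTORA"
  else if PySem.Str.startswith token "COMPORT" = true then "COMPORTA"
  else if PySem.Str.startswith token "MANIG" = true ∨ PySem.Str.startswith token "MANGUIT" = true ∨ PySem.Str.startswith token "COMPENS" = true then "MANIGUET"
  else if PySem.Str.startswith token "ELAST" = true then "ELASTICO"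
  else if PySem.Str.startswith token "LATON" = true ∨ PySem.Str.startswith token "LLAUT" = true ∨ token = "BRASS" then "LATON"
  else if PySem.Str.startswith token "INOX" = true ∨ token = "STAINLESS" then "INOX"
  else if PySem.Str.startswith token "RINOX" = true then "RINOX"
  else if token ∈ ["DOBLE", "SIMPLE", "ONDA", "WAFER", "LUG", "DISC", "GOMA", "MINI"] then token
  else if 6 ≤ PySem.Str.len token then String.ofList (PySem.List.slice token.toList none (some 5))
  else if 4 ≤ PySem.Str.len token then token
  else ""

-- ===== PORT B =====
-- exact-word dict: whole token -> root (identity words map to themselves)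
def pvExactEntries : List (String × String) :=
  [("VALVE", "VALVULA"), ("BALL", "BOLA"), ("FILTER", "FILTRO"), ("CHECK", "RETENCION"),
   ("FLANGED", "BRIDAS"), ("CAST", "FUNDICION"), ("BRASS", "LATON"), ("STAINLESS", "INOX"),
   ("DOBLE", "DOBLE"), ("SIMPLE", "SIMPLE"), ("ONDA", "ONDA"), ("WAFER", "WAFER"),
   ("LUG", "LUG"), ("DISC", "DISC"), ("GOMA", "GOMA"), ("MINI", "MINI")]

-- prefix dict: token[:len(prefix)] -> root (the key set is prefix-free)
def pvPrefixEntries : List (String × String) :=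
  [("VALVUL", "VALVULA"), ("ESFER", "BOLA"), ("BOLA", "BOLA"), ("FILTR", "FILTRO"),
   ("RETENC", "RETENCION"), ("BRID", "BRIDAS"), ("FUNDIC", "FUNDICION"),
   ("PAPALLON", "PAPALLONA"), ("MARIP", "PAPALLONA"), ("BUTTERFL", "PAPALLONA"),
   ("ROSC", "ROSCA"), ("THREAD", "ROSCA"), ("VIA", "VIAS"), ("VIE", "VIAS"),
   ("CLAPET", "CLAPETA"), ("PRESS", "PRESION"), ("PRESI", "PRESION"),
   ("REDUCT", "REDUCTORA"), ("COMPORT", "COMPORTA"), ("MANIG", "MANIGUET"),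
   ("MANGUIT", "MANIGUET"), ("COMPENS", "MANIGUET"), ("ELAST", "ELASTICO"),
   ("LATON", "LATON"), ("LLAUT", "LATON"), ("INOX", "INOX"), ("RINOX", "RINOX")]

def pvExactRoots : PySem.Dict String String := PySem.Dict.ofList pvExactEntries
def pvPrefixRoots : PySem.Dict String String := PySem.Dict.ofList pvPrefixEntries

-- the 'for k in range(8, 2, -1)' loop of _root_lookup
def pvScanK (token : String) : List Int → Option String
  | [] => none
  | k :: rest =>
    match PySem.Dict.get? pvPrefixRoots (String.ofList (PySem.List.slice token.toList none (some k))) with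
    | some r => some r
    | none => pvScanK token rest

-- _root_lookup
def pvRootLookup (token : String) : String :=
  match PySem.Dict.get? pvExactRoots token with
  | some r => r
  | none =>
    match pvScanK token (PySem.List.pyRange 8 2 (-1)) with
    | some r => r
    | none =>
      if 6 ≤ PySem.Str.len token then String.ofList (PySem.List.slice token.toList none (some 5))
      else if 4 ≤ PySem.Str.len token then token
      else ""

def genebre_context_root_py_alt (token : String) : String :=
  if token = "" ∨ token ∈ pvStopwords then ""
  else if PySem.Str.startswith token "DN" = true ∧
          (PySem.List.slice token.toList (some 2) none).any PySem.Chars.isdigit = true then "DN"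
  else pvRootLookup token

-- ===== PRECONDITION & SPEC =====
def Spec_genebre_context_root_py (token : String) (out : String) : Prop := out = genebre_context_root_py_alt token
instance (token : String) (out : String) : Decidable (Spec_genebre_context_root_py token out) := by unfold Spec_genebre_context_root_py; infer_instance

-- ===== CLAIM (what is proved, stated in full; the proofs are below) =====
def Claim_equal_genebre_context_root_py : Prop := ∀ (token : String), Dom_genebre_context_root_py token → Spec_genebre_context_root_py token (genebre_context_root_py token)

-- ===== LEMMAS AND PROOFS =====

-- facts about the literal tables, checked by the kernel
theorem pvPrefixItems : pvPrefixRoots.items = pvPrefixEntries := by decide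
theorem pvPrefixNodup : pvPrefixRoots.keys.Nodup := by decide
theorem pvExactItems : pvExactRoots.items = pvExactEntries := by decide
-- the prefix keys are prefix-free (so at most one of them is a prefix of any token)
theorem pvPrefixFree : ∀ p ∈ pvPrefixEntries, ∀ q ∈ pvPrefixEntries,
    p.1.toList <+: q.1.toList → p = q := by decide
-- no exact word extends a prefix key
theorem pvExactNoPrefix : ∀ e ∈ pvExactEntries, ∀ p ∈ pvPrefixEntries,
    ¬ p.1.toList <+: e.1.toList := by decide
-- every prefix-key length occurs in range(8, 2, -1)
theorem pvPrefixLenMem : ∀ p ∈ pvPrefixEntries,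
    ((p.1.toList.length : Int)) ∈ PySem.List.pyRange 8 2 (-1) := by decide

theorem pvSwIff (s p : String) : PySem.Str.startswith s p = true ↔ p.toList <+: s.toList := by
  rw [PySem.Str.startswith_eq]
  exact PySem.Chars.startswith_iff s.toList p.toList

-- prefix-dict lookup, characterised through the entries list
theorem pvPrefixGet_some (s r : String) (h : PySem.Dict.get? pvPrefixRoots s = some r) :
    (s, r) ∈ pvPrefixEntries := by
  have := (PySem.Dict.get?_eq_some_iff_mem_items pvPrefixRoots s r pvPrefixNodup).mp h
  rwa [pvPrefixItems] at this

theorem pvPrefixGet_of_mem (s r : String) (h : (s, r) ∈ pvPrefixEntries) :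
    PySem.Dict.get? pvPrefixRoots s = some r :=
  PySem.Dict.get?_of_mem_items pvPrefixRoots (by rw [pvPrefixItems]; exact h) pvPrefixNodup

theorem pvExactGet_none (s : String) (h : ∀ e ∈ pvExactEntries, s ≠ e.1) :
    PySem.Dict.get? pvExactRoots s = none := by
  rw [PySem.Dict.get?_eq_none_iff_not_mem_keys]
  intro hmem
  have hk : pvExactRoots.keys = pvExactEntries.map (·.1) := by
    simp only [PySem.Dict.keys, pvExactItems]
  rw [hk] at hmem
  obtain ⟨e, he, hes⟩ := List.mem_map.mp hmem
  exact h e he hes.symm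

-- a successful slice lookup names a prefix of the token
theorem pvScan_step (token : String) (k : Int) (hk : 0 ≤ k) (r : String)
    (h : PySem.Dict.get? pvPrefixRoots (String.ofList (PySem.List.slice token.toList none (some k))) = some r) :
    ∃ q ∈ pvPrefixEntries, q.1.toList <+: token.toList ∧ q.2 = r := by
  have hmem := pvPrefixGet_some _ _ h
  refine ⟨_, hmem, ?_, rfl⟩
  rw [String.toList_ofList, PySem.List.slice_to token.toList hk]
  exact List.take_prefix _ _

-- the scan over any list of nonnegative indices containing |p| returns p's root
theorem pvScanK_hit (token p r : String) (hmem : (p, r) ∈ pvPrefixEntries)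
    (hpre : p.toList <+: token.toList) :
    ∀ ks : List Int, (∀ k ∈ ks, 0 ≤ k) → ((p.toList.length : Int)) ∈ ks →
      pvScanK token ks = some r := by
  intro ks
  induction ks with
  | nil => intro _ hlen; exact absurd hlen (List.not_mem_nil)
  | cons k rest ih =>
    intro hnn hlen
    have hk : 0 ≤ k := hnn k (List.mem_cons_self)
    unfold pvScanK
    cases hget : PySem.Dict.get? pvPrefixRoots (String.ofList (PySem.List.slice token.toList none (some k))) with
    | some r' =>
      obtain ⟨q, hq, hqpre, hqr⟩ := pvScan_step token k hk r' hget
      have heq : q = (p, r) := by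
        rcases List.prefix_or_prefix_of_prefix hqpre hpre with h1 | h1
        · exact pvPrefixFree q hq (p, r) hmem h1
        · exact (pvPrefixFree (p, r) hmem q hq h1).symm
      have hr : r' = r := by rw [← hqr, heq]
      rw [hr]
    | none =>
      have hkne : k ≠ (p.toList.length : Int) := by
        intro hkeq
        have htake : PySem.List.slice token.toList none (some k) = p.toList := by
          rw [PySem.List.slice_to token.toList hk, hkeq]
          simp only [Int.toNat_natCast]
          exact (List.prefix_iff_eq_take.mp hpre).symm
        rw [htake, String.ofList_toList, pvPrefixGet_of_mem p r hmem] at hget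
        exact absurd hget (by simp)
      have hmem' : ((p.toList.length : Int)) ∈ rest := by
        rcases List.mem_cons.mp hlen with h | h
        · exact absurd h.symm hkne
        · exact h
      exact ih (fun j hj => hnn j (List.mem_cons_of_mem _ hj)) hmem'

-- with no prefix key a prefix of the token, the scan finds nothing
theorem pvScanK_miss (token : String)
    (h : ∀ p ∈ pvPrefixEntries, ¬ p.1.toList <+: token.toList) :
    ∀ ks : List Int, (∀ k ∈ ks, 0 ≤ k) → pvScanK token ks = none := by
  intro ks
  induction ks with
  | nil => intro _; rfl
  | cons k rest ih =>
    intro hnn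
    have hk : 0 ≤ k := hnn k (List.mem_cons_self)
    unfold pvScanK
    cases hget : PySem.Dict.get? pvPrefixRoots (String.ofList (PySem.List.slice token.toList none (some k))) with
    | some r' =>
      obtain ⟨q, hq, hqpre, _⟩ := pvScan_step token k hk r' hget
      exact absurd hqpre (h q hq)
    | none => exact ih (fun j hj => hnn j (List.mem_cons_of_mem _ hj))

-- B's lookup on a token that extends the prefix key p
theorem pvRootLookup_of_prefix (token p r : String) (hmem : (p, r) ∈ pvPrefixEntries)
    (hsw : PySem.Str.startswith token p = true) : pvRootLookup token = r := by
  have hpre := (pvSwIff token p).mp hsw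
  unfold pvRootLookup
  rw [pvExactGet_none token
    (fun e he heq => pvExactNoPrefix e he (p, r) hmem (heq ▸ hpre)),
    pvScanK_hit token p r hmem hpre _ (by decide) (pvPrefixLenMem (p, r) hmem)]

-- B's lookup on a token matching no pattern: the length fallback
theorem pvRootLookup_fallback (token : String)
    (h1 : ¬(PySem.Str.startswith token "VALVUL" = true ∨ token = "VALVE"))
    (h2 : ¬(PySem.Str.startswith token "ESFER" = true ∨ PySem.Str.startswith token "BOLA" = true ∨ token = "BALL"))
    (h3 : ¬(PySem.Str.startswith token "FILTR" = true ∨ token = "FILTER"))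
    (h4 : ¬(PySem.Str.startswith token "RETENC" = true ∨ token = "CHECK"))
    (h5 : ¬(PySem.Str.startswith token "BRID" = true ∨ token = "FLANGED"))
    (h6 : ¬(PySem.Str.startswith token "FUNDIC" = true ∨ token = "CAST"))
    (h7 : ¬(PySem.Str.startswith token "PAPALLON" = true ∨ PySem.Str.startswith token "MARIP" = true ∨ PySem.Str.startswith token "BUTTERFL" = true))
    (h8 : ¬(PySem.Str.startswith token "ROSC" = true ∨ PySem.Str.startswith token "THREAD" = true))
    (h9 : ¬(PySem.Str.startswith token "VIA" = true ∨ PySem.Str.startswith token "VIE" = true))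
    (h10 : ¬PySem.Str.startswith token "CLAPET" = true)
    (h11 : ¬(PySem.Str.startswith token "PRESS" = true ∨ PySem.Str.startswith token "PRESI" = true))
    (h12 : ¬PySem.Str.startswith token "REDUCT" = true)
    (h13 : ¬PySem.Str.startswith token "COMPORT" = true)
    (h14 : ¬(PySem.Str.startswith token "MANIG" = true ∨ PySem.Str.startswith token "MANGUIT" = true ∨ PySem.Str.startswith token "COMPENS" = true))
    (h15 : ¬PySem.Str.startswith token "ELAST" = true)
    (h16 : ¬(PySem.Str.startswith token "LATON" = true ∨ PySem.Str.startswith token "LLAUT" = true ∨ token = "BRASS"))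
    (h17 : ¬(PySem.Str.startswith token "INOX" = true ∨ token = "STAINLESS"))
    (h18 : ¬PySem.Str.startswith token "RINOX" = true)
    (h19 : ¬token ∈ ["DOBLE", "SIMPLE", "ONDA", "WAFER", "LUG", "DISC", "GOMA", "MINI"]) :
    pvRootLookup token =
      (if 6 ≤ PySem.Str.len token then String.ofList (PySem.List.slice token.toList none (some 5))
       else if 4 ≤ PySem.Str.len token then token
       else "") := by
  simp only [List.mem_cons, List.not_mem_nil, or_false, not_or] at h19
  have hp : ∀ p ∈ pvPrefixEntries, ¬ p.1.toList <+: token.toList := by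
    intro p hp
    simp only [pvPrefixEntries, List.mem_cons, List.not_mem_nil, or_false] at hp
    rcases hp with rfl|rfl|rfl|rfl|rfl|rfl|rfl|rfl|rfl|rfl|rfl|rfl|rfl|rfl|rfl|rfl|rfl|rfl|rfl|rfl|rfl|rfl|rfl|rfl|rfl|rfl|rfl
    · exact fun hc => h1 (Or.inl ((pvSwIff token _).mpr hc))
    · exact fun hc => h2 (Or.inl ((pvSwIff token _).mpr hc))
    · exact fun hc => h2 (Or.inr (Or.inl ((pvSwIff token _).mpr hc)))
    · exact fun hc => h3 (Or.inl ((pvSwIff token _).mpr hc))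
    · exact fun hc => h4 (Or.inl ((pvSwIff token _).mpr hc))
    · exact fun hc => h5 (Or.inl ((pvSwIff token _).mpr hc))
    · exact fun hc => h6 (Or.inl ((pvSwIff token _).mpr hc))
    · exact fun hc => h7 (Or.inl ((pvSwIff token _).mpr hc))
    · exact fun hc => h7 (Or.inr (Or.inl ((pvSwIff token _).mpr hc)))
    · exact fun hc => h7 (Or.inr (Or.inr ((pvSwIff token _).mpr hc)))
    · exact fun hc => h8 (Or.inl ((pvSwIff token _).mpr hc))
    · exact fun hc => h8 (Or.inr ((pvSwIff token _).mpr hc))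
    · exact fun hc => h9 (Or.inl ((pvSwIff token _).mpr hc))
    · exact fun hc => h9 (Or.inr ((pvSwIff token _).mpr hc))
    · exact fun hc => h10 ((pvSwIff token _).mpr hc)
    · exact fun hc => h11 (Or.inl ((pvSwIff token _).mpr hc))
    · exact fun hc => h11 (Or.inr ((pvSwIff token _).mpr hc))
    · exact fun hc => h12 ((pvSwIff token _).mpr hc)
    · exact fun hc => h13 ((pvSwIff token _).mpr hc)
    · exact fun hc => h14 (Or.inl ((pvSwIff token _).mpr hc))
    · exact fun hc => h14 (Or.inr (Or.inl ((pvSwIff token _).mpr hc)))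
    · exact fun hc => h14 (Or.inr (Or.inr ((pvSwIff token _).mpr hc)))
    · exact fun hc => h15 ((pvSwIff token _).mpr hc)
    · exact fun hc => h16 (Or.inl ((pvSwIff token _).mpr hc))
    · exact fun hc => h16 (Or.inr (Or.inl ((pvSwIff token _).mpr hc)))
    · exact fun hc => h17 (Or.inl ((pvSwIff token _).mpr hc))
    · exact fun hc => h18 ((pvSwIff token _).mpr hc)
  have he : ∀ e ∈ pvExactEntries, token ≠ e.1 := by
    intro e he
    simp only [pvExactEntries, List.mem_cons, List.not_mem_nil, or_false] at he
    rcases he with rfl|rfl|rfl|rfl|rfl|rfl|rfl|rfl|rfl|rfl|rfl|rfl|rfl|rfl|rfl|rfl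
    · exact fun hc => h1 (Or.inr hc)
    · exact fun hc => h2 (Or.inr (Or.inr hc))
    · exact fun hc => h3 (Or.inr hc)
    · exact fun hc => h4 (Or.inr hc)
    · exact fun hc => h5 (Or.inr hc)
    · exact fun hc => h6 (Or.inr hc)
    · exact fun hc => h16 (Or.inr (Or.inr hc))
    · exact fun hc => h17 (Or.inr hc)
    · exact fun hc => h19.1 hc
    · exact fun hc => h19.2.1 hc
    · exact fun hc => h19.2.2.1 hc
    · exact fun hc => h19.2.2.2.1 hc
    · exact fun hc => h19.2.2.2.2.1 hc
    · exact fun hc => h19.2.2.2.2.2.1 hc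
    · exact fun hc => h19.2.2.2.2.2.2.1 hc
    · exact fun hc => h19.2.2.2.2.2.2.2 hc
  unfold pvRootLookup
  rw [pvExactGet_none token he, pvScanK_miss token hp _ (by decide)]

-- ===== VERDICT (by name: the statement is the Claim_ definition above) =====
set_option maxHeartbeats 1000000 in
theorem genebre_context_root_py_spec : Claim_equal_genebre_context_root_py := by
  intro token _
  unfold Spec_genebre_context_root_py genebre_context_root_py genebre_context_root_py_alt
  by_cases hg1 : token = "" ∨ token ∈ pvStopwords
  · rw [if_pos hg1, if_pos hg1]
  rw [if_neg hg1, if_neg hg1]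
  by_cases hg2 : PySem.Str.startswith token "DN" = true ∧
          (PySem.List.slice token.toList (some 2) none).any PySem.Chars.isdigit = true
  · rw [if_pos hg2, if_pos hg2]
  rw [if_neg hg2, if_neg hg2]
  by_cases h1 : PySem.Str.startswith token "VALVUL" = true ∨ token = "VALVE"
  · rw [if_pos h1]
    rcases h1 with h | rfl
    · exact (pvRootLookup_of_prefix token "VALVUL" "VALVULA" (by decide) h).symm
    · decide
  rw [if_neg h1]
  by_cases h2 : PySem.Str.startswith token "ESFER" = true ∨ PySem.Str.startswith token "BOLA" = true ∨ token = "BALL"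
  · rw [if_pos h2]
    rcases h2 with h | h | rfl
    · exact (pvRootLookup_of_prefix token "ESFER" "BOLA" (by decide) h).symm
    · exact (pvRootLookup_of_prefix token "BOLA" "BOLA" (by decide) h).symm
    · decide
  rw [if_neg h2]
  by_cases h3 : PySem.Str.startswith token "FILTR" = true ∨ token = "FILTER"
  · rw [if_pos h3]
    rcases h3 with h | rfl
    · exact (pvRootLookup_of_prefix token "FILTR" "FILTRO" (by decide) h).symm
    · decide
  rw [if_neg h3]
  by_cases h4 : PySem.Str.startswith token "RETENC" = true ∨ token = "CHECK"
  · rw [if_pos h4]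
    rcases h4 with h | rfl
    · exact (pvRootLookup_of_prefix token "RETENC" "RETENCION" (by decide) h).symm
    · decide
  rw [if_neg h4]
  by_cases h5 : PySem.Str.startswith token "BRID" = true ∨ token = "FLANGED"
  · rw [if_pos h5]
    rcases h5 with h | rfl
    · exact (pvRootLookup_of_prefix token "BRID" "BRIDAS" (by decide) h).symm
    · decide
  rw [if_neg h5]
  by_cases h6 : PySem.Str.startswith token "FUNDIC" = true ∨ token = "CAST"
  · rw [if_pos h6]
    rcases h6 with h | rfl
    · exact (pvRootLookup_of_prefix token "FUNDIC" "FUNDICION" (by decide) h).symm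
    · decide
  rw [if_neg h6]
  by_cases h7 : PySem.Str.startswith token "PAPALLON" = true ∨ PySem.Str.startswith token "MARIP" = true ∨ PySem.Str.startswith token "BUTTERFL" = true
  · rw [if_pos h7]
    rcases h7 with h | h | h
    · exact (pvRootLookup_of_prefix token "PAPALLON" "PAPALLONA" (by decide) h).symm
    · exact (pvRootLookup_of_prefix token "MARIP" "PAPALLONA" (by decide) h).symm
    · exact (pvRootLookup_of_prefix token "BUTTERFL" "PAPALLONA" (by decide) h).symm
  rw [if_neg h7]
  by_cases h8 : PySem.Str.startswith token "ROSC" = true ∨ PySem.Str.startswith token "THREAD" = true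
  · rw [if_pos h8]
    rcases h8 with h | h
    · exact (pvRootLookup_of_prefix token "ROSC" "ROSCA" (by decide) h).symm
    · exact (pvRootLookup_of_prefix token "THREAD" "ROSCA" (by decide) h).symm
  rw [if_neg h8]
  by_cases h9 : PySem.Str.startswith token "VIA" = true ∨ PySem.Str.startswith token "VIE" = true
  · rw [if_pos h9]
    rcases h9 with h | h
    · exact (pvRootLookup_of_prefix token "VIA" "VIAS" (by decide) h).symm
    · exact (pvRootLookup_of_prefix token "VIE" "VIAS" (by decide) h).symm
  rw [if_neg h9]
  by_cases h10 : PySem.Str.startswith token "CLAPET" = true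
  · rw [if_pos h10]
    exact (pvRootLookup_of_prefix token "CLAPET" "CLAPETA" (by decide) h10).symm
  rw [if_neg h10]
  by_cases h11 : PySem.Str.startswith token "PRESS" = true ∨ PySem.Str.startswith token "PRESI" = true
  · rw [if_pos h11]
    rcases h11 with h | h
    · exact (pvRootLookup_of_prefix token "PRESS" "PRESION" (by decide) h).symm
    · exact (pvRootLookup_of_prefix token "PRESI" "PRESION" (by decide) h).symm
  rw [if_neg h11]
  by_cases h12 : PySem.Str.startswith token "REDUCT" = true
  · rw [if_pos h12]
    exact (pvRootLookup_of_prefix token "REDUCT" "REDUCTORA" (by decide) h12).symm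
  rw [if_neg h12]
  by_cases h13 : PySem.Str.startswith token "COMPORT" = true
  · rw [if_pos h13]
    exact (pvRootLookup_of_prefix token "COMPORT" "COMPORTA" (by decide) h13).symm
  rw [if_neg h13]
  by_cases h14 : PySem.Str.startswith token "MANIG" = true ∨ PySem.Str.startswith token "MANGUIT" = true ∨ PySem.Str.startswith token "COMPENS" = true
  · rw [if_pos h14]
    rcases h14 with h | h | h
    · exact (pvRootLookup_of_prefix token "MANIG" "MANIGUET" (by decide) h).symm
    · exact (pvRootLookup_of_prefix token "MANGUIT" "MANIGUET" (by decide) h).symm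
    · exact (pvRootLookup_of_prefix token "COMPENS" "MANIGUET" (by decide) h).symm
  rw [if_neg h14]
  by_cases h15 : PySem.Str.startswith token "ELAST" = true
  · rw [if_pos h15]
    exact (pvRootLookup_of_prefix token "ELAST" "ELASTICO" (by decide) h15).symm
  rw [if_neg h15]
  by_cases h16 : PySem.Str.startswith token "LATON" = true ∨ PySem.Str.startswith token "LLAUT" = true ∨ token = "BRASS"
  · rw [if_pos h16]
    rcases h16 with h | h | rfl
    · exact (pvRootLookup_of_prefix token "LATON" "LATON" (by decide) h).symm
    · exact (pvRootLookup_of_prefix token "LLAUT" "LATON" (by decide) h).symm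
    · decide
  rw [if_neg h16]
  by_cases h17 : PySem.Str.startswith token "INOX" = true ∨ token = "STAINLESS"
  · rw [if_pos h17]
    rcases h17 with h | rfl
    · exact (pvRootLookup_of_prefix token "INOX" "INOX" (by decide) h).symm
    · decide
  rw [if_neg h17]
  by_cases h18 : PySem.Str.startswith token "RINOX" = true
  · rw [if_pos h18]
    exact (pvRootLookup_of_prefix token "RINOX" "RINOX" (by decide) h18).symm
  rw [if_neg h18]
  by_cases h19 : token ∈ ["DOBLE", "SIMPLE", "ONDA", "WAFER", "LUG", "DISC", "GOMA", "MINI"]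
  · rw [if_pos h19]
    simp only [List.mem_cons, List.not_mem_nil, or_false] at h19
    rcases h19 with rfl|rfl|rfl|rfl|rfl|rfl|rfl|rfl <;> decide
  rw [if_neg h19]
  rw [pvRootLookup_fallback token h1 h2 h3 h4 h5 h6 h7 h8 h9 h10 h11 h12 h13 h14 h15 h16 h17 h18 h19]
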